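-- pv_equiv track=rewrite | github.com/DavOstx7/CTF | PicoCTF/NewVignere/decrypt.py | segments
-- ===== SOURCE A (Python) =====
-- def segments(values):
-- 	x = []
-- 	for _, value in values:
-- 		for i in range(4, value // 2):
-- 			if(value % i == 0):
-- 				x.append(i)
-- 		x.append(value)
-- 	result = []
-- 	for value in x:
-- 		if(x.count(value) > 1 and value not in result):
-- 			result.append(value)
-- 	return result
-- ===== SOURCE B (Python) =====
-- def segments(values):
--     x = []
--     for _, v in values:
--         half = v // 2
--         small = []
--         large = []
--         i = 1
--         while i * i <= v:
--             if v % i == 0: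
--                 if 4 <= i < half:
--                     small.append(i)
--                 q = v // i
--                 if q != i and 4 <= q < half:
--                     large.append(q)
--             i += 1
--         x.extend(small)
--         large.reverse()
--         x.extend(large)
--         x.append(v)
--     counts = {}
--     for v in x:
--         counts[v] = counts.get(v, 0) + 1
--     result = []
--     seen = set()
--     for v in x:
--         if counts.get(v, 0) > 1 and v not in seen:
--             seen.add(v)
--             result.append(v)
--     return result
-- ===== Notes on version B (the rewrite author's own statement) =====
-- stated objective: faster
-- what changed: Divisors in [4, v//2) are found by enumerating i up to sqrt(v) and emitting both members of each divisor pair (small ones ascending, large cofactors collected then reversed), instead of trial-dividing every i in range(4, v//2); the duplicate pass uses a count dictionary built once plus a seen-set instead of calling x.count inside the loop.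
import Mathlib
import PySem

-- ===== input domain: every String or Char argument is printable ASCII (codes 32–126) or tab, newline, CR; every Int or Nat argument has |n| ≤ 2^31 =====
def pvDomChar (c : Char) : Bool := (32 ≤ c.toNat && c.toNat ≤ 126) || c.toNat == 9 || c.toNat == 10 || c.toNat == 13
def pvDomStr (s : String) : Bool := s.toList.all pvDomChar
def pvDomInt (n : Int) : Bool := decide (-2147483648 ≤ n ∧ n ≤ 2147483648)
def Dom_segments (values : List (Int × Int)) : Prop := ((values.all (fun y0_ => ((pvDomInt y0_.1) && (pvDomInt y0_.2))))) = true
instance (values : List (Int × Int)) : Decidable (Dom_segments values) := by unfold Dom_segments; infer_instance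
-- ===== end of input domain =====

-- B replaces A's trial division over range(4, v//2) by sqrt-bounded divisor-pair
-- enumeration and A's quadratic x.count-in-loop duplicate pass by a count
-- dictionary plus seen-set single pass; same return value.

-- ===== PORT A =====
def segments (values : List (Int × Int)) : List Int :=
  let x := values.foldl (fun x p =>
    ((PySem.List.pyRange 4 (PySem.Int.floordiv p.2 2) 1).foldl
      (fun x i => if PySem.Int.mod p.2 i = 0 then x ++ [i] else x) x) ++ [p.2]) []
  x.foldl (fun result value =>
    if 1 < PySem.List.count x value ∧ value ∉ result then result ++ [value]
    else result) []

-- ===== PORT B =====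
-- the 'while i * i <= v' loop of Source B (i is the Python loop counter, always ≥ 0, kept as Nat)
def divLoop (v half : Int) (i : Nat) (small large : List Int) : List Int × List Int :=
  if h : (i : Int) * i ≤ v then
    if PySem.Int.mod v i = 0 then
      divLoop v half (i + 1)
        (if 4 ≤ (i : Int) ∧ (i : Int) < half then small ++ [(i : Int)] else small)
        (if PySem.Int.floordiv v i ≠ (i : Int) ∧ 4 ≤ PySem.Int.floordiv v i ∧ PySem.Int.floordiv v i < half
         then large ++ [PySem.Int.floordiv v i] else large)
    else divLoop v half (i + 1) small large
  else (small, large)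
termination_by v.toNat + 1 - i * i
decreasing_by
  all_goals
    have h0 : (0 : Int) ≤ (i : Int) * i := by positivity
    have h1 : ((i * i : Nat) : Int) ≤ v := by push_cast; exact h
    have h2 : (i * i : Nat) ≤ v.toNat := by omega
    have h3 : (i + 1) * (i + 1) = i * i + 2 * i + 1 := by ring
    omega

def segments_alt (values : List (Int × Int)) : List Int :=
  let x := values.foldl (fun x p =>
    let sl := divLoop p.2 (PySem.Int.floordiv p.2 2) 1 [] []
    x ++ sl.1 ++ sl.2.reverse ++ [p.2]) []
  let counts : PySem.Dict Int Int := x.foldl (fun d v => d.insert v (d.getD v 0 + 1)) PySem.Dict.empty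
  (x.foldl (fun (st : PySem.Set Int × List Int) v =>
    if 1 < counts.getD v 0 ∧ v ∉ st.1 then (PySem.Set.add st.1 v, st.2 ++ [v])
    else st) (PySem.Set.empty, [])).2

-- ===== PRECONDITION & SPEC =====
def Spec_segments (values : List (Int × Int)) (out : List Int) : Prop := out = segments_alt values
instance (values : List (Int × Int)) (out : List Int) : Decidable (Spec_segments values out) := by unfold Spec_segments; infer_instance

-- ===== CLAIM (what is proved, stated in full; the proofs are below) =====
def Claim_equal_segments : Prop := ∀ (values : List (Int × Int)), Dom_segments values → Spec_segments values (segments values)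

-- ===== LEMMAS AND PROOFS =====

-- proof-side spec of the loop: the candidates i, i+1, … while the square stays ≤ v
def cand (v : Int) (i : Nat) : List Int :=
  if h : (i : Int) * i ≤ v then (i : Int) :: cand v (i + 1) else []
termination_by v.toNat + 1 - i * i
decreasing_by
  have h0 : (0 : Int) ≤ (i : Int) * i := by positivity
  have h1 : ((i * i : Nat) : Int) ≤ v := by push_cast; exact h
  have h2 : (i * i : Nat) ≤ v.toNat := by omega
  have h3 : (i + 1) * (i + 1) = i * i + 2 * i + 1 := by ring
  omega

def smallP (v half j : Int) : Bool :=
  decide (PySem.Int.mod v j = 0 ∧ 4 ≤ j ∧ j < half)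

def largeP (v half j : Int) : Bool :=
  decide (PySem.Int.mod v j = 0 ∧
    (PySem.Int.floordiv v j ≠ j ∧ 4 ≤ PySem.Int.floordiv v j ∧ PySem.Int.floordiv v j < half))

lemma divLoop_eq (v half : Int) (i : Nat) (s l : List Int) :
    divLoop v half i s l =
      (s ++ (cand v i).filter (smallP v half),
       l ++ ((cand v i).filter (largeP v half)).map (fun j => PySem.Int.floordiv v j)) := by
  fun_induction divLoop v half i s l with
  | case1 i s l h hm ih =>
    simp only [dite_eq_ite] at ih
    rw [ih, show cand v i = (i : Int) :: cand v (i + 1) from by rw [cand, dif_pos h]]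
    simp only [List.filter_cons, smallP, largeP, hm, true_and, decide_eq_true_eq]
    split_ifs with h1 h2 h2 <;> simp [List.map_cons, List.append_assoc]
  | case2 i s l h hm ih =>
    rw [ih, show cand v i = (i : Int) :: cand v (i + 1) from by rw [cand, dif_pos h]]
    simp only [List.filter_cons, smallP, largeP, hm, false_and, decide_false]
    simp
  | case3 i s l h =>
    rw [cand, dif_neg h]
    simp

lemma mem_cand (v : Int) (i : Nat) (j : Int) :
    j ∈ cand v i ↔ (i : Int) ≤ j ∧ j * j ≤ v := by
  fun_induction cand v i with
  | case1 i h ih =>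
    simp only [List.mem_cons, ih]
    constructor
    · rintro (rfl | ⟨h1, h2⟩)
      · exact ⟨le_refl _, h⟩
      · exact ⟨by push_cast at h1 ⊢; omega, h2⟩
    · rintro ⟨h1, h2⟩
      by_cases hj : j = (i : Int)
      · exact Or.inl hj
      · exact Or.inr ⟨by push_cast at h1 ⊢; omega, h2⟩
  | case2 i h =>
    simp only [List.not_mem_nil, false_iff, not_and]
    intro h1 h2
    exact h (le_trans (by nlinarith [Int.natCast_nonneg i]) h2)

lemma pairwise_cand (v : Int) (i : Nat) : (cand v i).Pairwise (· < ·) := by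
  fun_induction cand v i with
  | case1 i h ih =>
    refine List.Pairwise.cons (fun b hb => ?_) ih
    have := (mem_cand v (i + 1) b).mp hb
    push_cast at this ⊢
    omega
  | case2 i h => exact List.Pairwise.nil

lemma pairwise_cand_strong (v : Int) (i : Nat) :
    (cand v i).Pairwise (fun a b => (i : Int) ≤ a ∧ a < b ∧ b * b ≤ v) := by
  fun_induction cand v i with
  | case1 i h ih =>
    refine List.Pairwise.cons (fun b hb => ?_) (ih.imp ?_)
    · obtain ⟨h1, h2⟩ := (mem_cand v (i + 1) b).mp hb
      refine ⟨le_refl _, by push_cast at h1 ⊢; omega, h2⟩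
    · rintro a b ⟨h1, h2, h3⟩
      exact ⟨by push_cast at h1 ⊢; omega, h2, h3⟩
  | case2 i h => exact List.Pairwise.nil

-- arithmetic about the large cofactor v // j of a small divisor j
lemma cof_facts (v j : Int) (hj : 1 ≤ j) (hjv : j * j ≤ v)
    (hm : PySem.Int.mod v j = 0) (hne : PySem.Int.floordiv v j ≠ j) :
    j < PySem.Int.floordiv v j ∧
    v < PySem.Int.floordiv v j * PySem.Int.floordiv v j ∧
    PySem.Int.mod v (PySem.Int.floordiv v j) = 0 ∧
    PySem.Int.floordiv v j * j = v := by
  have hj0 : (0 : Int) < j := hj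
  have hdvd : j ∣ v := (PySem.Int.mod_eq_zero_iff_dvd v j).mp hm
  have hfd : PySem.Int.floordiv v j = v / j := PySem.Int.floordiv_eq_ediv_of_pos hj0
  have hbj : v / j * j = v := Int.ediv_mul_cancel hdvd
  have hjb : j ≤ v / j := by nlinarith
  have hlt : j < v / j := lt_of_le_of_ne hjb (fun h => hne (hfd.trans h.symm))
  refine ⟨hfd ▸ hlt, by rw [hfd]; nlinarith, ?_, hfd ▸ hbj⟩
  rw [hfd, PySem.Int.mod_eq_zero_iff_dvd]
  exact ⟨j, hbj.symm⟩

-- the large-divisor case of the backward direction: d ∣ v, 4 ≤ d, v < d*d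
lemma back_facts (v d : Int) (hd4 : 4 ≤ d) (hm : PySem.Int.mod v d = 0)
    (hv : 10 ≤ v) (hbig : v < d * d) :
    1 ≤ PySem.Int.floordiv v d ∧ PySem.Int.floordiv v d * PySem.Int.floordiv v d ≤ v ∧
    PySem.Int.mod v (PySem.Int.floordiv v d) = 0 ∧
    PySem.Int.floordiv v (PySem.Int.floordiv v d) = d ∧
    d ≠ PySem.Int.floordiv v d := by
  have hd0 : (0 : Int) < d := by linarith
  have hdvd : d ∣ v := (PySem.Int.mod_eq_zero_iff_dvd v d).mp hm
  have hfd : PySem.Int.floordiv v d = v / d := PySem.Int.floordiv_eq_ediv_of_pos hd0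
  have hjd : v / d * d = v := Int.ediv_mul_cancel hdvd
  have hj1 : 1 ≤ v / d := by nlinarith
  have hjlt : v / d < d := by nlinarith
  have hveq : v = v / d * d := hjd.symm
  refine ⟨hfd ▸ hj1, by rw [hfd]; nlinarith, ?_, ?_, by rw [hfd]; omega⟩
  · rw [hfd, PySem.Int.mod_eq_zero_iff_dvd]
    exact ⟨d, by linarith⟩
  · rw [hfd, PySem.Int.floordiv_eq_ediv_of_pos hj1]
    have hq : v / (v / d) * (v / d) = v := Int.ediv_mul_cancel ⟨d, hveq⟩
    have hq2 : v / (v / d) * (v / d) = d * (v / d) := by rw [hq]; linarith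
    exact mul_right_cancel₀ (by omega) hq2

-- the per-value core: sqrt divisor-pair enumeration = trial division over [4, v//2)
lemma split_eq (v : Int) :
    (cand v 1).filter (smallP v (PySem.Int.floordiv v 2)) ++
      (((cand v 1).filter (largeP v (PySem.Int.floordiv v 2))).map
        (fun j => PySem.Int.floordiv v j)).reverse =
    (PySem.List.pyRange 4 (PySem.Int.floordiv v 2) 1).filter
      (fun i => decide (PySem.Int.mod v i = 0)) := by
  set half := PySem.Int.floordiv v 2 with hhalf
  have h10 : ∀ d : Int, 4 ≤ d → d < half → 10 ≤ v := by
    intro d h4 hdh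
    have h5 : (5 : Int) ≤ half := by omega
    have := (PySem.Int.le_floordiv_iff_mul_le (a := v) (b := 2) (q := 5) (by norm_num)).mp
      (hhalf ▸ h5)
    linarith
  have hS : ∀ d : Int, d ∈ (cand v 1).filter (smallP v half) ↔
      ((1 : Int) ≤ d ∧ d * d ≤ v) ∧ (PySem.Int.mod v d = 0 ∧ 4 ≤ d ∧ d < half) := by
    intro d
    rw [List.mem_filter, mem_cand]
    simp [smallP]
  have hM : ∀ d : Int,
      d ∈ ((cand v 1).filter (largeP v half)).map (fun j => PySem.Int.floordiv v j) ↔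
      ∃ j : Int, (((1 : Int) ≤ j ∧ j * j ≤ v) ∧
        (PySem.Int.mod v j = 0 ∧ PySem.Int.floordiv v j ≠ j ∧
         4 ≤ PySem.Int.floordiv v j ∧ PySem.Int.floordiv v j < half)) ∧
        PySem.Int.floordiv v j = d := by
    intro d
    rw [List.mem_map]
    constructor
    · rintro ⟨j, hj, rfl⟩
      rw [List.mem_filter, mem_cand] at hj
      refine ⟨j, ⟨⟨?_, hj.1.2⟩, ?_⟩, rfl⟩
      · have := hj.1.1; push_cast at this; omega
      · have := hj.2; simpa [largeP] using this
    · rintro ⟨j, ⟨⟨hj1, hj2⟩, hlp⟩, rfl⟩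
      refine ⟨j, ?_, rfl⟩
      rw [List.mem_filter, mem_cand]
      exact ⟨⟨by push_cast; omega, hj2⟩, by simp [largeP]; tauto⟩
  -- membership agreement
  have hmem : ∀ d : Int,
      d ∈ (cand v 1).filter (smallP v half) ++
        (((cand v 1).filter (largeP v half)).map (fun j => PySem.Int.floordiv v j)).reverse ↔
      d ∈ (PySem.List.pyRange 4 half 1).filter (fun i => decide (PySem.Int.mod v i = 0)) := by
    intro d
    rw [List.mem_append, List.mem_reverse, hS, hM, List.mem_filter, PySem.List.mem_pyRange_one]
    simp only [decide_eq_true_eq]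
    constructor
    · rintro (⟨⟨hd1, hd2⟩, hm, h4, hh⟩ | ⟨j, ⟨⟨hj1, hj2⟩, hm, hne, h4, hh⟩, rfl⟩)
      · exact ⟨⟨h4, hh⟩, hm⟩
      · obtain ⟨_, _, hmod, _⟩ := cof_facts v j hj1 hj2 hm hne
        exact ⟨⟨h4, hh⟩, hmod⟩
    · rintro ⟨⟨h4, hh⟩, hm⟩
      have hv10 := h10 d h4 hh
      by_cases hc : d * d ≤ v
      · exact Or.inl ⟨⟨by omega, hc⟩, hm, h4, hh⟩
      · obtain ⟨hj1, hj2, hjm, hjd, hdne⟩ :=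
          back_facts v d h4 hm hv10 (by omega)
        exact Or.inr ⟨PySem.Int.floordiv v d, ⟨⟨hj1, hj2⟩, hjm,
          by rw [hjd]; exact hdne, by rw [hjd]; exact h4, by rw [hjd]; exact hh⟩, hjd⟩
  -- sortedness of the left side
  have pS : ((cand v 1).filter (smallP v half)).Pairwise (· < ·) :=
    (pairwise_cand v 1).filter _
  have pM : ((((cand v 1).filter (largeP v half)).map
      (fun j => PySem.Int.floordiv v j)).reverse).Pairwise (· < ·) := by
    rw [List.pairwise_reverse, List.pairwise_map, List.pairwise_filter]
    refine (pairwise_cand_strong v 1).imp ?_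
    rintro a b ⟨ha1, hab, hb2⟩ hpa hpb
    simp only [largeP, decide_eq_true_eq] at hpa hpb
    have ha1' : (1 : Int) ≤ a := by exact_mod_cast ha1
    obtain ⟨haf, hav, _, hae⟩ := cof_facts v a ha1' (by nlinarith) hpa.1 hpa.2.1
    obtain ⟨hbf, hbv, _, hbe⟩ := cof_facts v b (by linarith) hb2 hpb.1 hpb.2.1
    nlinarith
  have pLHS : ((cand v 1).filter (smallP v half) ++
      (((cand v 1).filter (largeP v half)).map (fun j => PySem.Int.floordiv v j)).reverse).Pairwise
      (· < ·) := by
    rw [List.pairwise_append]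
    refine ⟨pS, pM, ?_⟩
    intro a ha b hb
    rw [hS] at ha
    rw [List.mem_reverse, hM] at hb
    obtain ⟨⟨_, ha2⟩, _, ha4, _⟩ := ha
    obtain ⟨j, ⟨⟨hj1, hj2⟩, hm, hne, h4, _⟩, rfl⟩ := hb
    obtain ⟨_, hbv, _, _⟩ := cof_facts v j hj1 hj2 hm hne
    nlinarith
  have pRHS : ((PySem.List.pyRange 4 half 1).filter
      (fun i => decide (PySem.Int.mod v i = 0))).Pairwise (· < ·) :=
    (PySem.List.pairwise_lt_pyRange_one 4 half).filter _
  exact List.Perm.eq_of_pairwise (le := (· ≤ ·))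
    (fun a b _ _ h1 h2 => le_antisymm h1 h2)
    (pLHS.imp le_of_lt) (pRHS.imp le_of_lt)
    ((List.perm_ext_iff_of_nodup (pLHS.imp (fun h => ne_of_lt h))
      (pRHS.imp (fun h => ne_of_lt h))).mpr hmem)

lemma fold_x_eq (values : List (Int × Int)) (acc : List Int) :
    values.foldl (fun x p =>
      let sl := divLoop p.2 (PySem.Int.floordiv p.2 2) 1 [] []
      x ++ sl.1 ++ sl.2.reverse ++ [p.2]) acc =
    values.foldl (fun x p =>
      ((PySem.List.pyRange 4 (PySem.Int.floordiv p.2 2) 1).foldl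
        (fun x i => if PySem.Int.mod p.2 i = 0 then x ++ [i] else x) x) ++ [p.2]) acc := by
  induction values generalizing acc with
  | nil => rfl
  | cons p t ih =>
    simp only [List.foldl_cons]
    rw [ih]
    congr 1
    rw [PySem.List.foldl_append_ite_eq_filter, divLoop_eq]
    simp only [List.nil_append]
    rw [← split_eq p.2]
    simp [List.append_assoc]

lemma phase2 (x : List Int) (l : List Int) (seen : PySem.Set Int) (res : List Int)
    (hinv : ∀ a, a ∈ seen ↔ a ∈ res) :
    (l.foldl (fun (st : PySem.Set Int × List Int) v =>
      if 1 < (PySem.Dict.counter x).getD v 0 ∧ v ∉ st.1 then (PySem.Set.add st.1 v, st.2 ++ [v])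
      else st) (seen, res)).2 =
    l.foldl (fun result value =>
      if 1 < PySem.List.count x value ∧ value ∉ result then result ++ [value]
      else result) res := by
  induction l generalizing seen res with
  | nil => rfl
  | cons v t ih =>
    simp only [List.foldl_cons]
    have hmem : (v ∉ seen) ↔ (v ∉ res) := not_congr (hinv v)
    have hcnt : (1 < (PySem.Dict.counter x).getD v 0) ↔ (1 < PySem.List.count x v) := by
      rw [PySem.Dict.getD_counter, PySem.List.count_eq]
      exact_mod_cast Iff.rfl
    by_cases hc : 1 < PySem.List.count x v ∧ v ∉ res
    · rw [if_pos (⟨hcnt.mpr hc.1, hmem.mpr hc.2⟩ : _ ∧ _), if_pos hc]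
      exact ih _ _ (fun a => by
        simp [PySem.Set.mem_add, hinv a])
    · rw [if_neg (fun h => hc ⟨hcnt.mp h.1, hmem.mp h.2⟩), if_neg hc]
      exact ih _ _ hinv

-- ===== VERDICT (by name: the statement is the Claim_ definition above) =====
theorem segments_spec : Claim_equal_segments := by
  intro values _
  show segments values = segments_alt values
  simp only [segments, segments_alt]
  rw [fold_x_eq, PySem.Dict.foldl_insert_getD_add_one_eq_counter]
  exact (phase2 _ _ _ _ (by simp [PySem.Set.empty])).symm
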